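-- pv_equiv track=rewrite | github.com/acq06/VisionAID-Server | app/utils/post_processing/post_processing.py | split_by_axis
-- ===== SOURCE A (Python) =====
-- def split_by_axis(bboxes, axis):
--     # Group bounding boxes based on axis overlap
--     grouped = []
--     current_group = []
--     for i, box in enumerate(bboxes):
--         if not current_group:
--             current_group.append(box)
--         else:
--             if is_overlap(current_group[-1], box, axis):
--                 current_group.append(box)
--             else:
--                 grouped.append(current_group)
--                 current_group = [box]
--     if current_group:
--         grouped.append(current_group)
--
--     return grouped if len(grouped) > 1 else []
--
-- def is_overlap(box1, box2, axis):
--     # Check overlap between two bounding boxes along a specified axis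
--     if axis == 0:  # Vertical axis (x)
--         return box1[2] >= box2[0]
--     elif axis == 1:  # Horizontal axis (y)
--         return box1[3] >= box2[1]
-- ===== SOURCE B (Python) =====
-- def is_overlap(box1, box2, axis):
--     # Check overlap between two bounding boxes along a specified axis
--     if axis == 0:
--         return box1[2] >= box2[0]
--     elif axis == 1:
--         return box1[3] >= box2[1]
--
--
-- def split_by_axis(bboxes, axis):
--     # Boundary decomposition: find split indices between consecutive boxes,
--     # then take slices of bboxes between successive boundaries.
--     groups = []
--     start = 0
--     for i in range(1, len(bboxes)):
--         if not is_overlap(bboxes[i - 1], bboxes[i], axis):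
--             groups.append(bboxes[start:i])
--             start = i
--     if bboxes:
--         groups.append(bboxes[start:])
--     return groups if len(groups) > 1 else []
-- ===== Notes on version B (the rewrite author's own statement) =====
-- stated objective: alternative
-- what changed: Replaces A's scan that grows a current_group list and flushes it on each break with a split-point decomposition: B iterates over index pairs, records boundary indices, and emits slices bboxes[start:i] between successive boundaries, carrying only an integer start.
import Mathlib
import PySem

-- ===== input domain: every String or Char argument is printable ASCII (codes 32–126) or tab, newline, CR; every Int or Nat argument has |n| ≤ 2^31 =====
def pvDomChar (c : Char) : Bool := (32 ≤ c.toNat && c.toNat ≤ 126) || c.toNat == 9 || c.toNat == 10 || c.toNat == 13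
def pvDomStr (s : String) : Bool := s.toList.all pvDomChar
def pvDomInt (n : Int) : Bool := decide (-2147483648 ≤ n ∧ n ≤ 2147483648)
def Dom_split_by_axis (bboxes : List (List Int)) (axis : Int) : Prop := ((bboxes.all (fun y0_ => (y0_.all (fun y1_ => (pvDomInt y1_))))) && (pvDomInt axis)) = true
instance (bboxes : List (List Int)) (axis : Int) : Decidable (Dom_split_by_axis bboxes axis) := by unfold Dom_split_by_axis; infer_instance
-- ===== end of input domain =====

-- B replaces A's grow-and-flush current_group scan by a split-point decomposition
-- (record boundary indices, emit slices between them); equal return values, same cost.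

-- ===== PORT A =====
-- is_overlap (module helper shared by A and B): outer none = IndexError,
-- inner Option Bool is Python's True/False/None return value.
def pyIsOverlap (box1 box2 : List Int) (axis : Int) : Option (Option Bool) :=
  if axis = 0 then
    match PySem.List.pyGet? box1 2, PySem.List.pyGet? box2 0 with
    | some a, some b => some (some (decide (b ≤ a)))
    | _, _ => none
  else if axis = 1 then
    match PySem.List.pyGet? box1 3, PySem.List.pyGet? box2 1 with
    | some a, some b => some (some (decide (b ≤ a)))
    | _, _ => none
  else some none

-- A's for-loop over boxes, state (grouped, current_group); none = IndexError.
def splitLoopA (boxes : List (List Int)) (axis : Int)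
    (grouped : List (List (List Int))) (cur : List (List Int)) :
    Option (List (List (List Int)) × List (List Int)) :=
  match boxes with
  | [] => some (grouped, cur)
  | box :: rest =>
    if cur.isEmpty then
      splitLoopA rest axis grouped (cur ++ [box])
    else
      match PySem.List.pyGet? cur (-1) with  -- current_group[-1]
      | none => none
      | some last =>
        match pyIsOverlap last box axis with
        | none => none
        | some r =>
          if r.getD false then splitLoopA rest axis grouped (cur ++ [box])
          else splitLoopA rest axis (grouped ++ [cur]) [box]

def split_by_axis (bboxes : List (List Int)) (axis : Int) : List (List (List Int)) :=
  match splitLoopA bboxes axis [] [] with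
  | none => []  -- Python raises IndexError here; excluded by Pre_
  | some (grouped, cur) =>
    let grouped := if !cur.isEmpty then grouped ++ [cur] else grouped
    if grouped.length > 1 then grouped else []

-- ===== PORT B =====
-- B's for-loop over i in range(1, len(bboxes)), state (groups, start); none = IndexError.
def splitLoopB (idxs : List Int) (bboxes : List (List Int)) (axis : Int)
    (groups : List (List (List Int))) (start : Int) :
    Option (List (List (List Int)) × Int) :=
  match idxs with
  | [] => some (groups, start)
  | i :: rest =>
    match PySem.List.pyGet? bboxes (i - 1), PySem.List.pyGet? bboxes i with
    | some p, some q =>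
      match pyIsOverlap p q axis with
      | none => none
      | some r =>
        if r.getD false then splitLoopB rest bboxes axis groups start
        else splitLoopB rest bboxes axis
          (groups ++ [PySem.List.slice bboxes (some start) (some i)]) i
    | _, _ => none

def split_by_axis_alt (bboxes : List (List Int)) (axis : Int) : List (List (List Int)) :=
  match splitLoopB (PySem.List.pyRange 1 (bboxes.length : Int) 1) bboxes axis [] 0 with
  | none => []  -- Python raises IndexError here; excluded by Pre_
  | some (groups, start) =>
    let groups := if !bboxes.isEmpty then groups ++ [PySem.List.slice bboxes (some start) none] else groups
    if groups.length > 1 then groups else []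

-- ===== PRECONDITION & SPEC =====
-- Pre_ excludes exactly the inputs on which Python A raises IndexError: with a valid
-- axis (0 or 1), some consecutive pair of boxes is too short for the indices is_overlap
-- reads (box1[2]/box2[0] for axis 0, box1[3]/box2[1] for axis 1).
def Pre_split_by_axis (bboxes : List (List Int)) (axis : Int) : Prop :=
  (axis = 0 → ∀ p ∈ bboxes.zip bboxes.tail, 3 ≤ p.1.length ∧ 1 ≤ p.2.length) ∧
  (axis = 1 → ∀ p ∈ bboxes.zip bboxes.tail, 4 ≤ p.1.length ∧ 2 ≤ p.2.length)
instance (bboxes : List (List Int)) (axis : Int) : Decidable (Pre_split_by_axis bboxes axis) := by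
  unfold Pre_split_by_axis; infer_instance

def pvWitness_split_by_axis : List (List Int) × Int :=
  ([[0, 0, 2, 2], [1, 1, 3, 3], [10, 10, 12, 12]], 0)

def Spec_split_by_axis (bboxes : List (List Int)) (axis : Int) (out : List (List (List Int))) : Prop := out = split_by_axis_alt bboxes axis
instance (bboxes : List (List Int)) (axis : Int) (out : List (List (List Int))) : Decidable (Spec_split_by_axis bboxes axis out) := by unfold Spec_split_by_axis; infer_instance

-- ===== CLAIM (what is proved, stated in full; the proofs are below) =====
def Claim_equal_split_by_axis : Prop := ∀ (bboxes : List (List Int)) (axis : Int), Dom_split_by_axis bboxes axis → Pre_split_by_axis bboxes axis → Spec_split_by_axis bboxes axis (split_by_axis bboxes axis)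

-- ===== LEMMAS AND PROOFS =====

-- Finishing step of A (applied to the loop result).
def finA : Option (List (List (List Int)) × List (List Int)) → List (List (List Int))
  | none => []
  | some (grouped, cur) =>
    let grouped := if !cur.isEmpty then grouped ++ [cur] else grouped
    if grouped.length > 1 then grouped else []

-- Finishing step of B.
def finB (bboxes : List (List Int)) :
    Option (List (List (List Int)) × Int) → List (List (List Int))
  | none => []
  | some (groups, start) =>
    let groups := if !bboxes.isEmpty then groups ++ [PySem.List.slice bboxes (some start) none] else groups
    if groups.length > 1 then groups else []

theorem key (k : Nat) : ∀ (bboxes : List (List Int)) (axis : Int)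
    (grouped : List (List (List Int))) (start i : Nat),
    start < i → i ≤ bboxes.length → bboxes.length - i = k →
    finA (splitLoopA (bboxes.drop i) axis grouped
      (PySem.List.slice bboxes (some (start : Int)) (some (i : Int))))
    = finB bboxes (splitLoopB (PySem.List.pyRange (i : Int) (bboxes.length : Int) 1)
        bboxes axis grouped (start : Int)) := by
  induction k with
  | zero =>
    intro bboxes axis grouped start i hsi hin hk
    have hi : i = bboxes.length := by omega
    subst hi
    rw [List.drop_length, PySem.List.pyRange_one_eq_nil (by omega)]
    simp only [splitLoopA, splitLoopB, finA, finB]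
    have hcur : PySem.List.slice bboxes (some (start : Int)) (some (bboxes.length : Int))
        = bboxes.drop start := by
      rw [PySem.List.slice_natCast, List.take_of_length_le (by simp)]
    have hlast : PySem.List.slice bboxes (some (start : Int)) none = bboxes.drop start :=
      PySem.List.slice_from_natCast ..
    have hne : (bboxes.drop start).isEmpty = false := by
      rw [List.isEmpty_eq_false_iff]; exact List.ne_nil_of_length_pos (by simp; omega)
    have hbne : bboxes.isEmpty = false := by
      rw [List.isEmpty_eq_false_iff]; exact List.ne_nil_of_length_pos (by omega)
    rw [hcur, hlast, hne, hbne]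
  | succ k ih =>
    intro bboxes axis grouped start i hsi hin hk
    have hi : i < bboxes.length := by omega
    have hdrop : bboxes.drop i = bboxes[i] :: bboxes.drop (i + 1) :=
      List.drop_eq_getElem_cons hi
    have hcur : PySem.List.slice bboxes (some (start : Int)) (some (i : Int))
        = (bboxes.drop start).take (i - start) := PySem.List.slice_natCast ..
    have hclen : ((bboxes.drop start).take (i - start)).length = i - start := by
      simp; omega
    have hne : ((bboxes.drop start).take (i - start)).isEmpty = false := by
      rw [List.isEmpty_eq_false_iff]; exact List.ne_nil_of_length_pos (by rw [hclen]; omega)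
    have hlastv : ((bboxes.drop start).take (i - start)).getLast? = some bboxes[i - 1] := by
      rw [List.getLast?_eq_getElem?, hclen, List.getElem?_take_of_lt (by omega),
        List.getElem?_drop, List.getElem?_eq_getElem (by omega)]
      congr 1; congr 1; omega
    have hrange : PySem.List.pyRange (i : Int) (bboxes.length : Int) 1
        = (i : Int) :: PySem.List.pyRange ((i : Int) + 1) (bboxes.length : Int) 1 :=
      PySem.List.pyRange_one_cons (by exact_mod_cast hi)
    have hgetm1 : PySem.List.pyGet? bboxes ((i : Int) - 1) = some bboxes[i - 1] := by
      have : ((i : Int) - 1) = ((i - 1 : Nat) : Int) := by omega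
      rw [this, PySem.List.pyGet?_natCast, List.getElem?_eq_getElem (by omega)]
    have hget : PySem.List.pyGet? bboxes (i : Int) = some bboxes[i] := by
      rw [PySem.List.pyGet?_natCast, List.getElem?_eq_getElem hi]
    rw [hdrop, hrange]
    simp only [splitLoopA, splitLoopB, hcur, hne, PySem.List.pyGet?_neg_one, hlastv,
      hgetm1, hget]
    cases hov : pyIsOverlap bboxes[i - 1] bboxes[i] axis with
    | none => rfl
    | some r =>
      cases hr : r.getD false with
      | true =>
        simp only [hr, if_true]
        have hext : (bboxes.drop start).take (i - start) ++ [bboxes[i]]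
            = PySem.List.slice bboxes (some (start : Int)) (some ((i : Int) + 1)) := by
          have h1 : ((i : Int) + 1) = ((i + 1 : Nat) : Int) := by omega
          rw [h1, PySem.List.slice_natCast]
          have h2 : bboxes[i] = (bboxes.drop start)[i - start]'(by simp; omega) := by
            simp only [List.getElem_drop]; congr 1; omega
          rw [h2, List.take_append_getElem]
          congr 1; omega
        rw [hext]
        have h1 : ((i : Int) + 1) = ((i + 1 : Nat) : Int) := by omega
        rw [h1]
        exact ih bboxes axis grouped start (i + 1) (by omega) (by omega) (by omega)
      | false =>
        simp only [hr]
        have hsingle : [bboxes[i]] = PySem.List.slice bboxes (some (i : Int)) (some ((i : Int) + 1)) := by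
          have h1 : ((i : Int) + 1) = ((i + 1 : Nat) : Int) := by omega
          have h2 : i + 1 - i = 1 := by omega
          rw [h1, PySem.List.slice_natCast, h2, hdrop]
          rfl
        rw [hsingle, ← hcur]
        have h1 : ((i : Int) + 1) = ((i + 1 : Nat) : Int) := by omega
        rw [h1]
        exact ih bboxes axis (grouped ++ [PySem.List.slice bboxes (some (start : Int)) (some (i : Int))]) i (i + 1) (by omega) (by omega) (by omega)

theorem split_by_axis_spec : Claim_equal_split_by_axis := by
  intro bboxes axis _ _
  unfold Spec_split_by_axis
  have hA : split_by_axis bboxes axis = finA (splitLoopA bboxes axis [] []) := by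
    unfold split_by_axis finA; rfl
  have hB : split_by_axis_alt bboxes axis
      = finB bboxes (splitLoopB (PySem.List.pyRange 1 (bboxes.length : Int) 1) bboxes axis [] 0) := by
    unfold split_by_axis_alt finB; rfl
  rw [hA, hB]
  cases bboxes with
  | nil => rfl
  | cons b bs =>
    have hstep : splitLoopA (b :: bs) axis [] [] = splitLoopA bs axis [] [b] := by
      simp [splitLoopA]
    rw [hstep]
    have hbs : bs = (b :: bs).drop 1 := rfl
    have hb : [b] = PySem.List.slice (b :: bs) (some ((0 : Nat) : Int)) (some ((1 : Nat) : Int)) := by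
      rw [PySem.List.slice_natCast]; rfl
    have h0 : ((0 : Nat) : Int) = 0 := rfl
    have h1 : ((1 : Nat) : Int) = 1 := rfl
    rw [hbs, hb]
    have := key bs.length (b :: bs) axis [] 0 1 (by omega) (by simp) (by simp)
    rw [h0, h1] at this
    exact this
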